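-- pv_equiv track=rewrite | github.com/adesjoke3/python_pros | debug_assignment2.py | remove_even_numbers
-- ===== SOURCE A (Python) =====
-- def remove_even_numbers(input_list):
--     i = 0
--     while i < len(input_list):
--         if input_list[i] % 2 == 0:
--             input_list.pop(i)
--         else:
--             i += 1
--     return input_list
-- ===== SOURCE B (Python) =====
-- def remove_even_numbers(input_list):
--     w = 0
--     for x in input_list:
--         if x % 2:
--             input_list[w] = x
--             w += 1
--     del input_list[w:]
--     return input_list
-- ===== Notes on version B (the rewrite author's own statement) =====
-- stated objective: faster
-- what changed: Replaces the quadratic pop-at-index loop with a single-pass two-pointer in-place compaction (write pointer + tail truncation), keeping the same mutation of the argument list.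
import Mathlib
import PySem

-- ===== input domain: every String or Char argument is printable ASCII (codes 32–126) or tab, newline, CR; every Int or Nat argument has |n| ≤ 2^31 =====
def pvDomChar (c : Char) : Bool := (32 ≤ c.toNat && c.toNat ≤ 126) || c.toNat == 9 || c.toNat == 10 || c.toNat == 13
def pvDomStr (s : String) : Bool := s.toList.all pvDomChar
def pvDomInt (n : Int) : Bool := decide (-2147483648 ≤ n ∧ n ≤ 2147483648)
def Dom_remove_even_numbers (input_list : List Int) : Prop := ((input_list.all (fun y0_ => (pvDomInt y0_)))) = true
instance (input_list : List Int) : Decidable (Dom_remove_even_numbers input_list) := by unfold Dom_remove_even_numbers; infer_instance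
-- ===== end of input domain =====

-- B replaces A's quadratic pop-at-index loop by a single-pass two-pointer in-place
-- compaction (objective: faster). Both A and B mutate the argument list into the
-- returned list; the equivalence proved here is about the returned value.

-- ===== PORT A =====
-- A's while-loop: index i over the list; pop input_list[i] when even, else i += 1.
-- pop(i) is l.take i ++ l.drop (i+1); loop terminates because len - i decreases.
def removeLoopA (l : List Int) (i : Nat) : List Int :=
  if h : i < l.length then
    if PySem.Int.mod l[i] 2 = 0 then
      removeLoopA (l.take i ++ l.drop (i + 1)) i
    else
      removeLoopA l (i + 1)
  else l
termination_by l.length - i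
decreasing_by
  · simp [List.length_take, List.length_drop]; omega
  · omega

def remove_even_numbers (input_list : List Int) : List Int :=
  removeLoopA input_list 0

-- ===== PORT B =====
-- B's for-loop: state (buf, w); an odd x is written at buf[w] and w advances;
-- `del input_list[w:]` at the end is buf.take w.
def remove_even_numbers_alt (input_list : List Int) : List Int :=
  let r := input_list.foldl
    (fun (s : List Int × Nat) x =>
      if PySem.Int.mod x 2 ≠ 0 then (s.1.set s.2 x, s.2 + 1) else s)
    (input_list, 0)
  r.1.take r.2

-- ===== PRECONDITION & SPEC =====
def Spec_remove_even_numbers (input_list : List Int) (out : List Int) : Prop := out = remove_even_numbers_alt input_list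
instance (input_list : List Int) (out : List Int) : Decidable (Spec_remove_even_numbers input_list out) := by unfold Spec_remove_even_numbers; infer_instance

-- ===== CLAIM (what is proved, stated in full; the proofs are below) =====
def Claim_equal_remove_even_numbers : Prop := ∀ (input_list : List Int), Dom_remove_even_numbers input_list → Spec_remove_even_numbers input_list (remove_even_numbers input_list)

-- ===== LEMMAS AND PROOFS =====

-- the kept-element predicate shared by both proofs
def pOdd (x : Int) : Bool := decide (PySem.Int.mod x 2 ≠ 0)

-- A's loop keeps the processed prefix and filters the rest.
theorem removeLoopA_eq (l : List Int) (i : Nat) :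
    removeLoopA l i = l.take i ++ (l.drop i).filter pOdd := by
  fun_induction removeLoopA l i with
  | case1 l i h heven ih =>
    rw [ih]
    have h1 : (l.take i ++ l.drop (i + 1)).take i = l.take i := by
      rw [List.take_append_of_le_length (by simp; omega)]
      simp
    have h2 : (l.take i ++ l.drop (i + 1)).drop i = l.drop (i + 1) := by
      rw [List.drop_append_of_le_length (by simp; omega)]
      simp [List.length_take, Nat.min_eq_left (Nat.le_of_lt h)]
    rw [h1, h2]
    have : l.drop i = l[i] :: l.drop (i + 1) :=
      (List.drop_eq_getElem_cons h)
    rw [this, List.filter_cons]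
    have hf : pOdd l[i] = false := by
      simp only [pOdd, decide_eq_false_iff_not, not_not]; exact heven
    rw [hf]; simp
  | case2 l i h hodd ih =>
    rw [ih]
    have : l.drop i = l[i] :: l.drop (i + 1) :=
      (List.drop_eq_getElem_cons h)
    rw [this, List.filter_cons]
    have : pOdd l[i] = true := by
      simp only [pOdd, decide_eq_true_eq]; exact hodd
    rw [this]
    rw [List.take_succ_eq_append_getElem h, List.append_assoc]
    simp
  | case3 l i h =>
    have : l.length ≤ i := Nat.le_of_not_lt h
    simp [List.take_of_length_le this, List.drop_of_length_le this]

-- B's compaction invariant: if the written prefix has room for all kept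
-- elements, the final written prefix is the old prefix plus the kept elements.
theorem altLoop_inv (l : List Int) : ∀ (buf : List Int) (w : Nat),
    w + (l.filter pOdd).length ≤ buf.length →
    (let r := l.foldl
        (fun (s : List Int × Nat) x =>
          if PySem.Int.mod x 2 ≠ 0 then (s.1.set s.2 x, s.2 + 1) else s)
        (buf, w)
     r.1.take r.2) = buf.take w ++ l.filter pOdd := by
  induction l with
  | nil => intro buf w _; simp
  | cons x xs ih =>
    intro buf w hlen
    simp only [List.foldl_cons]
    by_cases hx : PySem.Int.mod x 2 ≠ 0
    · have hfil : (x :: xs).filter pOdd = x :: xs.filter pOdd := by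
        simp only [List.filter_cons, pOdd, decide_eq_true_eq, if_pos hx]
      rw [hfil] at hlen ⊢
      have hw : w < buf.length := by simp at hlen; omega
      rw [if_pos hx]
      rw [ih (buf.set w x) (w + 1) (by simp; simp at hlen; omega)]
      have : (buf.set w x).take (w + 1) = buf.take w ++ [x] := by
        rw [List.take_succ, List.getElem?_set_self (by omega)]
        rw [List.take_set_of_le (Nat.le_refl w)]
        simp
      rw [this, List.append_assoc]; simp
    · have hfil : (x :: xs).filter pOdd = xs.filter pOdd := by
        simp [List.filter_cons, pOdd]
        simpa using hx
      rw [hfil] at hlen ⊢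
      rw [if_neg hx]
      exact ih buf w hlen

theorem alt_eq_filter (l : List Int) :
    remove_even_numbers_alt l = l.filter pOdd := by
  have h := altLoop_inv l l 0 (by simpa using List.length_filter_le pOdd l)
  simpa [remove_even_numbers_alt] using h

-- ===== VERDICT (by name: the statement is the Claim_ definition above) =====
theorem remove_even_numbers_spec : Claim_equal_remove_even_numbers := by
  intro l _
  show remove_even_numbers l = remove_even_numbers_alt l
  rw [alt_eq_filter]
  simpa using removeLoopA_eq l 0
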